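-- pv_equiv track=rewrite | github.com/Airheumatologist/cleaningestion | scripts/ingestion/03_extract_pmc_tables.py | classify_evidence_grade
-- ===== SOURCE A (Python) =====
-- from typing import Dict, Any, Optional, List
--
-- def classify_evidence_grade(article_type: str, pub_types: List[str]) -> tuple[Optional[str], Optional[int]]:
--     """Classify evidence grade based on article type."""
--     article_type_lower = article_type.lower()
--     pub_types_lower = [pt.lower() for pt in pub_types]
--
--     # Check for highest evidence
--     if any(term in article_type_lower or any(term in pt for pt in pub_types_lower)
--            for term in ['systematic review', 'meta-analysis', 'meta analysis']):
--         return "A", 1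
--
--     if any(term in article_type_lower or any(term in pt for pt in pub_types_lower)
--            for term in ['guideline', 'practice guideline', 'consensus']):
--         return "A", 1
--
--     # Strong evidence
--     if any(term in article_type_lower or any(term in pt for pt in pub_types_lower)
--            for term in ['randomized controlled trial', 'rct', 'clinical trial']):
--         return "A", 2
--
--     # Good evidence
--     if any(term in article_type_lower or any(term in pt for pt in pub_types_lower)
--            for term in ['review', 'cohort study', 'observational study']):
--         return "B", 3
--
--     # Standard evidence
--     if any(term in article_type_lower or any(term in pt for pt in pub_types_lower)
--            for term in ['case-control', 'case control', 'cross-sectional']):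
--         return "B", 4
--
--     # Lower evidence
--     if any(term in article_type_lower or any(term in pt for pt in pub_types_lower)
--            for term in ['case report', 'case series', 'expert opinion']):
--         return "C", 5
--
--     # Default
--     return "B", 3
-- ===== SOURCE B (Python) =====
-- # Flattened keyword -> priority map; pick the minimum-priority matched keyword.
-- TERM_PRIORITY = {
--     'systematic review': 0, 'meta-analysis': 0, 'meta analysis': 0,
--     'guideline': 1, 'practice guideline': 1, 'consensus': 1,
--     'randomized controlled trial': 2, 'rct': 2, 'clinical trial': 2,
--     'review': 3, 'cohort study': 3, 'observational study': 3,
--     'case-control': 4, 'case control': 4, 'cross-sectional': 4,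
--     'case report': 5, 'case series': 5, 'expert opinion': 5,
-- }
-- RESULTS = {0: ('A', 1), 1: ('A', 1), 2: ('A', 2), 3: ('B', 3), 4: ('B', 4), 5: ('C', 5)}
--
-- def classify_evidence_grade(article_type, pub_types):
--     """Running-min over a flat keyword->priority map; no early return, no rule groups."""
--     haystacks = [article_type.lower()] + [pt.lower() for pt in pub_types]
--     best = 6
--     for term, pri in TERM_PRIORITY.items():
--         if pri < best and any(term in h for h in haystacks):
--             best = pri
--     return RESULTS.get(best, ('B', 3))
-- ===== Notes on version B (the rewrite author's own statement) =====
-- stated objective: alternative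
-- what changed: Replaces A's six unrolled first-match if-blocks by a minimum-priority selection: one flat keyword->priority map is scanned with a running-min accumulator (no early return, no rule groups) and the final priority is looked up in a result table; correct because the grouped rule order coincides with ascending priority.
import Mathlib
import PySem

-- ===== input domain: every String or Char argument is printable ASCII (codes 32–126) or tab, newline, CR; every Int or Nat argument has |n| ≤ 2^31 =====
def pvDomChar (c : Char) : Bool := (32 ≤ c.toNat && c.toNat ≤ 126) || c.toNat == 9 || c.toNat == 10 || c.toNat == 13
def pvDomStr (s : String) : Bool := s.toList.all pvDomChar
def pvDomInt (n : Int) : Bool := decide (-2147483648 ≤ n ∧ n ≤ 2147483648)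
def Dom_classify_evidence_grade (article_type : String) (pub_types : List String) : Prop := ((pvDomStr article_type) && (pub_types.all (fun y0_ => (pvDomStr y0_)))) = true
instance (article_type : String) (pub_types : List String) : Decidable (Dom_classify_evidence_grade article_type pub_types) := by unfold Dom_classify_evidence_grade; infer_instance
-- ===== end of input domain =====

-- B replaces A's six first-match if-blocks by a running-min over a flat keyword->priority map with a result table (objective: alternative).


-- ===== PORT A =====
-- helper: 'term in article_type_lower or any(term in pt for pt in pub_types_lower)'
def pvHitA (atl : String) (ptl : List String) (term : String) : Bool :=
  PySem.Str.isIn term atl || ptl.any (fun pt => PySem.Str.isIn term pt)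

def classify_evidence_grade (article_type : String) (pub_types : List String) : Option String × Option Int :=
  let atl := PySem.Str.lower article_type
  let ptl := pub_types.map PySem.Str.lower
  if ["systematic review", "meta-analysis", "meta analysis"].any (pvHitA atl ptl) then (some "A", some 1)
  else if ["guideline", "practice guideline", "consensus"].any (pvHitA atl ptl) then (some "A", some 1)
  else if ["randomized controlled trial", "rct", "clinical trial"].any (pvHitA atl ptl) then (some "A", some 2)
  else if ["review", "cohort study", "observational study"].any (pvHitA atl ptl) then (some "B", some 3)
  else if ["case-control", "case control", "cross-sectional"].any (pvHitA atl ptl) then (some "B", some 4)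
  else if ["case report", "case series", "expert opinion"].any (pvHitA atl ptl) then (some "C", some 5)
  else (some "B", some 3)

-- ===== PORT B =====
-- flat keyword -> priority map (dict iterated in insertion order)
def pvTermPri : List (String × Int) :=
  [ ("systematic review", 0), ("meta-analysis", 0), ("meta analysis", 0),
    ("guideline", 1), ("practice guideline", 1), ("consensus", 1),
    ("randomized controlled trial", 2), ("rct", 2), ("clinical trial", 2),
    ("review", 3), ("cohort study", 3), ("observational study", 3),
    ("case-control", 4), ("case control", 4), ("cross-sectional", 4),
    ("case report", 5), ("case series", 5), ("expert opinion", 5) ]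

def pvResults : PySem.Dict Int (Option String × Option Int) :=
  PySem.Dict.ofList
    [ (0, (some "A", some 1)), (1, (some "A", some 1)), (2, (some "A", some 2)),
      (3, (some "B", some 3)), (4, (some "B", some 4)), (5, (some "C", some 5)) ]

def classify_evidence_grade_alt (article_type : String) (pub_types : List String) : Option String × Option Int :=
  let haystacks := PySem.Str.lower article_type :: pub_types.map PySem.Str.lower
  let best := pvTermPri.foldl
    (fun b tp => if tp.2 < b ∧ haystacks.any (fun h => PySem.Str.isIn tp.1 h) then tp.2 else b) 6
  PySem.Dict.getD pvResults best (some "B", some 3)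

-- ===== PRECONDITION & SPEC =====
def Spec_classify_evidence_grade (article_type : String) (pub_types : List String) (out : Option String × Option Int) : Prop := out = classify_evidence_grade_alt article_type pub_types
instance (article_type : String) (pub_types : List String) (out : Option String × Option Int) : Decidable (Spec_classify_evidence_grade article_type pub_types out) := by unfold Spec_classify_evidence_grade; infer_instance

-- ===== CLAIM (what is proved, stated in full; the proofs are below) =====
def Claim_equal_classify_evidence_grade : Prop := ∀ (article_type : String) (pub_types : List String), Dom_classify_evidence_grade article_type pub_types → Spec_classify_evidence_grade article_type pub_types (classify_evidence_grade article_type pub_types)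

-- ===== LEMMAS AND PROOFS =====
-- table lemma: A's six grouped branches equal B's running-min fold, for any hit predicate c
lemma pvTable (c : String → Bool) :
    (if (c "systematic review" || (c "meta-analysis" || c "meta analysis")) = true then (some "A", some 1)
     else if (c "guideline" || (c "practice guideline" || c "consensus")) = true then (some "A", some 1)
     else if (c "randomized controlled trial" || (c "rct" || c "clinical trial")) = true then (some "A", some 2)
     else if (c "review" || (c "cohort study" || c "observational study")) = true then (some "B", some 3)
     else if (c "case-control" || (c "case control" || c "cross-sectional")) = true then (some "B", some 4)
     else if (c "case report" || (c "case series" || c "expert opinion")) = true then (some "C", some 5)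
     else (some "B", some 3))
    = PySem.Dict.getD pvResults
        (pvTermPri.foldl (fun b tp => if tp.2 < b ∧ c tp.1 = true then tp.2 else b) 6)
        (some "B", some 3) := by
  by_cases h0 : c "systematic review" = true
  · simp [pvTermPri, h0]; decide
  by_cases h1 : c "meta-analysis" = true
  · simp [pvTermPri, h0, h1]; decide
  by_cases h2 : c "meta analysis" = true
  · simp [pvTermPri, h0, h1, h2]; decide
  by_cases h3 : c "guideline" = true
  · simp [pvTermPri, h0, h1, h2, h3]; decide
  by_cases h4 : c "practice guideline" = true
  · simp [pvTermPri, h0, h1, h2, h3, h4]; decide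
  by_cases h5 : c "consensus" = true
  · simp [pvTermPri, h0, h1, h2, h3, h4, h5]; decide
  by_cases h6 : c "randomized controlled trial" = true
  · simp [pvTermPri, h0, h1, h2, h3, h4, h5, h6]; decide
  by_cases h7 : c "rct" = true
  · simp [pvTermPri, h0, h1, h2, h3, h4, h5, h6, h7]; decide
  by_cases h8 : c "clinical trial" = true
  · simp [pvTermPri, h0, h1, h2, h3, h4, h5, h6, h7, h8]; decide
  by_cases h9 : c "review" = true
  · simp [pvTermPri, h0, h1, h2, h3, h4, h5, h6, h7, h8, h9]; decide
  by_cases h10 : c "cohort study" = true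
  · simp [pvTermPri, h0, h1, h2, h3, h4, h5, h6, h7, h8, h9, h10]; decide
  by_cases h11 : c "observational study" = true
  · simp [pvTermPri, h0, h1, h2, h3, h4, h5, h6, h7, h8, h9, h10, h11]; decide
  by_cases h12 : c "case-control" = true
  · simp [pvTermPri, h0, h1, h2, h3, h4, h5, h6, h7, h8, h9, h10, h11, h12]; decide
  by_cases h13 : c "case control" = true
  · simp [pvTermPri, h0, h1, h2, h3, h4, h5, h6, h7, h8, h9, h10, h11, h12, h13]; decide
  by_cases h14 : c "cross-sectional" = true
  · simp [pvTermPri, h0, h1, h2, h3, h4, h5, h6, h7, h8, h9, h10, h11, h12, h13, h14]; decide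
  by_cases h15 : c "case report" = true
  · simp [pvTermPri, h0, h1, h2, h3, h4, h5, h6, h7, h8, h9, h10, h11, h12, h13, h14, h15]; decide
  by_cases h16 : c "case series" = true
  · simp [pvTermPri, h0, h1, h2, h3, h4, h5, h6, h7, h8, h9, h10, h11, h12, h13, h14, h15, h16]; decide
  by_cases h17 : c "expert opinion" = true
  · simp [pvTermPri, h0, h1, h2, h3, h4, h5, h6, h7, h8, h9, h10, h11, h12, h13, h14, h15, h16, h17]; decide
  simp [pvTermPri, h0, h1, h2, h3, h4, h5, h6, h7, h8, h9, h10, h11, h12, h13, h14, h15, h16, h17]; decide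

-- ===== VERDICT (by name: the statement is the Claim_ definition above) =====
theorem classify_evidence_grade_spec : Claim_equal_classify_evidence_grade := by
  intro at_ pts _
  unfold Spec_classify_evidence_grade classify_evidence_grade classify_evidence_grade_alt pvHitA
  simp only [List.any_cons, List.any_nil, Bool.or_false]
  exact pvTable (fun t => PySem.Str.isIn t (PySem.Str.lower at_) || (pts.map PySem.Str.lower).any (fun pt => PySem.Str.isIn t pt))
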